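-- pv_equiv track=rewrite | github.com/MaximPushkar/PythonUniversity | 1_term/Homeworks/Homework 7/problem 7_6.py | to_dec_normal
-- ===== SOURCE A (Python) =====
-- def to_dec_normal(n, k=2):
--     p = 1
--     ans = 0
--     while n != 0:
--         ans = ans + (n % 10) * p
--         n = n // 10
--         p *= k
--     return ans
-- ===== SOURCE B (Python) =====
-- def to_dec_normal(n, k=2):
--     # pass 1: collect decimal digits, least significant first
--     digits = []
--     while n != 0:
--         n, d = divmod(n, 10)
--         digits.append(d)
--     # pass 2: Horner fold, most significant first (no power accumulator)
--     ans = 0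
--     for d in reversed(digits):
--         ans = ans * k + d
--     return ans
-- ===== Notes on version B (the rewrite author's own statement) =====
-- stated objective: alternative
-- what changed: Replaces A's single loop with an explicit power accumulator p by two staged passes: first extract the decimal digit list via divmod, then a Horner fold (ans = ans*k + d) over the reversed list, eliminating the power variable.
import Mathlib
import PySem

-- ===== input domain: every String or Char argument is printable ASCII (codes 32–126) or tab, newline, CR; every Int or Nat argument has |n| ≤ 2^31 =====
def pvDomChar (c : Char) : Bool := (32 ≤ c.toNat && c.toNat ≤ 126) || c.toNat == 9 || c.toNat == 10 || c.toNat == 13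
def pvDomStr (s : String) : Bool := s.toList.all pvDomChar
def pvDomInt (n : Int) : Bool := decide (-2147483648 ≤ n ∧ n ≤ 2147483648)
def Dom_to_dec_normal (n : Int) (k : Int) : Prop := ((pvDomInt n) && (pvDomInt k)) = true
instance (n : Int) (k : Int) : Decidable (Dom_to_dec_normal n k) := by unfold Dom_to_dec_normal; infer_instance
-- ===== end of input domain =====

-- B replaces A's single loop with power accumulator p by two staged passes
-- (extract the decimal digit list, then a Horner fold over the reversed list);
-- the ports agree on every input.

-- ===== PORT A =====
-- A's while loop, fuel makes it total; fuel n.natAbs + 1 is enough for every n ≥ 0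
-- (the loop runs at most as many times as n has decimal digits).
def toDecLoopA (fuel : Nat) (n ans p k : Int) : Int :=
  match fuel with
  | 0 => ans
  | fuel + 1 =>
    if n ≠ 0 then
      toDecLoopA fuel (PySem.Int.floordiv n 10) (ans + (PySem.Int.mod n 10) * p) (p * k) k
    else ans

def to_dec_normal (n : Int) (k : Int) : Int := toDecLoopA (n.natAbs + 1) n 0 1 k

-- ===== PORT B =====
-- B's first pass: collect decimal digits, least significant first (same fuel guard).
def digitsLoopB (fuel : Nat) (n : Int) (digits : List Int) : List Int :=
  match fuel with
  | 0 => digits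
  | fuel + 1 =>
    if n = 0 then digits
    else digitsLoopB fuel (PySem.Int.floordiv n 10) (digits ++ [PySem.Int.mod n 10])

-- B's second pass: Horner fold over the reversed digit list.
def to_dec_normal_alt (n : Int) (k : Int) : Int :=
  (digitsLoopB (n.natAbs + 1) n []).reverse.foldl (fun ans d => ans * k + d) 0

-- ===== PRECONDITION & SPEC =====
-- (no Pre_: the two ports agree on every input; on n < 0 both Pythons diverge identically)
def Spec_to_dec_normal (n : Int) (k : Int) (out : Int) : Prop := out = to_dec_normal_alt n k
instance (n : Int) (k : Int) (out : Int) : Decidable (Spec_to_dec_normal n k out) := by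
  unfold Spec_to_dec_normal; infer_instance

-- ===== CLAIM (what is proved, stated in full; the proofs are below) =====
def Claim_equal_to_dec_normal : Prop :=
  ∀ (n : Int) (k : Int), Dom_to_dec_normal n k →
    Spec_to_dec_normal n k (to_dec_normal n k)

-- ===== LEMMAS AND PROOFS =====

-- the digit accumulator only ever grows on the right
lemma digitsLoopB_append (fuel : Nat) : ∀ (n : Int) (acc : List Int),
    digitsLoopB fuel n acc = acc ++ digitsLoopB fuel n [] := by
  induction fuel with
  | zero => intro n acc; simp [digitsLoopB]
  | succ fuel ih =>
    intro n acc
    by_cases h0 : n = 0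
    · simp [digitsLoopB, h0]
    · rw [digitsLoopB, if_neg h0, digitsLoopB, if_neg h0, List.nil_append,
        ih (PySem.Int.floordiv n 10) (acc ++ [PySem.Int.mod n 10]),
        ih (PySem.Int.floordiv n 10) ([PySem.Int.mod n 10])]
      simp [List.append_assoc]

-- B's Horner value of a least-significant-first digit list
def hornerLSB (k : Int) (ds : List Int) : Int :=
  ds.reverse.foldl (fun ans d => ans * k + d) 0

lemma hornerLSB_cons (k d : Int) (ds : List Int) :
    hornerLSB k (d :: ds) = hornerLSB k ds * k + d := by
  simp [hornerLSB, List.foldl_append]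

-- loop invariant: A's accumulator form equals B's two-pass value at the same fuel
lemma loopA_eq_horner (fuel : Nat) : ∀ (n ans p k : Int),
    toDecLoopA fuel n ans p k = ans + p * hornerLSB k (digitsLoopB fuel n []) := by
  induction fuel with
  | zero => intro n ans p k; simp [toDecLoopA, digitsLoopB, hornerLSB]
  | succ fuel ih =>
    intro n ans p k
    by_cases h0 : n = 0
    · simp [toDecLoopA, digitsLoopB, hornerLSB, h0]
    · rw [toDecLoopA, if_pos h0, digitsLoopB, if_neg h0,
        show digitsLoopB fuel (PySem.Int.floordiv n 10) ([] ++ [PySem.Int.mod n 10]) = _ from rfl]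
      rw [List.nil_append,
        digitsLoopB_append fuel (PySem.Int.floordiv n 10) [PySem.Int.mod n 10]]
      simp only [List.singleton_append, hornerLSB_cons]
      rw [ih]
      ring

-- ===== VERDICT (by name: the statement is the Claim_ definition above) =====
theorem to_dec_normal_spec : Claim_equal_to_dec_normal := by
  intro n k _
  unfold Spec_to_dec_normal to_dec_normal to_dec_normal_alt
  rw [loopA_eq_horner]
  show (0 : Int) + 1 * hornerLSB k _ = hornerLSB k _
  ring
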